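-- pv_equiv track=rewrite | github.com/alexandraback/datacollection | solutions_5644738749267968_1/Python/cdemartell/jam3.py | fair
-- ===== SOURCE A (Python) =====
-- def fair (nlist, klist, n):
-- 	fscore = 0
-- 	while n>0:
-- 		if klist[n-1]>nlist[n-1]:
-- 			nlist.pop(n-1)
-- 			klist.pop(n-1)
-- 			n = n-1
-- 		else:
-- 			nlist.pop(n-1)
-- 			klist.pop(0)
-- 			fscore = fscore + 1
-- 			n = n-1
-- 	return fscore
-- ===== SOURCE B (Python) =====
-- def fair(nlist, klist, n):
--     # Two-pointer scan; A pops from its lists in place, B reads them with indices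
--     # and leaves the arguments unmodified (return value is the same).
--     fscore = 0
--     j = n - 1
--     i = n - 1
--     while i >= 0:
--         if klist[j] > nlist[i]:
--             j -= 1
--         else:
--             fscore += 1
--         i -= 1
--     return fscore
-- ===== Notes on version B (the rewrite author's own statement) =====
-- stated objective: faster
-- what changed: Replaces the destructive loop that pops nlist[n-1] and klist[0]/klist[n-1] each round (pop(0) shifts the whole list) by a non-mutating two-pointer scan over the original lists with indices i and j, using the invariant that the element A reads as klist[n-1] is always the original klist[j].
import Mathlib
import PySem

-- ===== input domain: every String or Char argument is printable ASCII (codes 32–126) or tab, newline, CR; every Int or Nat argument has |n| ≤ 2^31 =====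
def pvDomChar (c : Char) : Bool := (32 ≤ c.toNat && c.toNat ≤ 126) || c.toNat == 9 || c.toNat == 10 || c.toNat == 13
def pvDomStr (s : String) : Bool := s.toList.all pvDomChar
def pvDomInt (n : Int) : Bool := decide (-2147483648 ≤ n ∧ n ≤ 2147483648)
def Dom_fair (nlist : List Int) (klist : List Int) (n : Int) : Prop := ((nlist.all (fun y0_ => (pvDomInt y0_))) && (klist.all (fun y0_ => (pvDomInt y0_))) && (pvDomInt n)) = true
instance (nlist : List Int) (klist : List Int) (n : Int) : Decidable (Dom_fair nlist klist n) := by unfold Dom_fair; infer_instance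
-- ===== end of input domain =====

-- B replaces A's destructive pop(0)/pop(n-1) loop (quadratic: pop(0) shifts the list) by a
-- non-mutating two-pointer index scan; A mutates its list arguments in place, B does not —
-- the equivalence proved here is about the return value only.

-- ===== PORT A =====
-- Python list.pop(i); Pre_fair keeps every access/pop in range, the 'none' fallback is never hit there.
def pvPopAt (xs : List Int) (i : Int) : List Int :=
  match PySem.List.pop? xs i with
  | some r => r.2
  | none => xs


-- while n>0: n decreases by 1 each iteration, so fuel n.toNat makes the loop structural.
def fairLoopA (fuel : Nat) (nlist klist : List Int) (n fscore : Int) : Int :=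
  match fuel with
  | 0 => fscore
  | fuel + 1 =>
    if 0 < n then
      if (PySem.List.pyGet? klist (n-1)).getD 0 > (PySem.List.pyGet? nlist (n-1)).getD 0 then
        fairLoopA fuel (pvPopAt nlist (n-1)) (pvPopAt klist (n-1)) (n-1) fscore
      else
        fairLoopA fuel (pvPopAt nlist (n-1)) (pvPopAt klist 0) (n-1) (fscore + 1)
    else fscore

def fair (nlist : List Int) (klist : List Int) (n : Int) : Int :=
  fairLoopA n.toNat nlist klist n 0

-- ===== PORT B =====
-- while i >= 0: i goes n-1, n-2, …, 0, so fuel n.toNat makes the loop structural.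
def fairLoopB (fuel : Nat) (nlist klist : List Int) (i j fscore : Int) : Int :=
  match fuel with
  | 0 => fscore
  | fuel + 1 =>
    if 0 ≤ i then
      if (PySem.List.pyGet? klist j).getD 0 > (PySem.List.pyGet? nlist i).getD 0 then
        fairLoopB fuel nlist klist (i-1) (j-1) fscore
      else
        fairLoopB fuel nlist klist (i-1) j (fscore + 1)
    else fscore

def fair_alt (nlist : List Int) (klist : List Int) (n : Int) : Int :=
  fairLoopB n.toNat nlist klist (n-1) (n-1) 0

-- ===== PRECONDITION & SPEC =====
-- Exactly the inputs on which A returns: with 0 < n, Python evaluates klist[n-1] and nlist[n-1]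
-- and raises IndexError unless n ≤ len of both (for n ≤ 0 the loop body never runs).
def Pre_fair (nlist : List Int) (klist : List Int) (n : Int) : Prop :=
  n ≤ (nlist.length : Int) ∧ n ≤ (klist.length : Int)
instance (nlist : List Int) (klist : List Int) (n : Int) : Decidable (Pre_fair nlist klist n) := by unfold Pre_fair; infer_instance

def pvWitness_fair : List Int × List Int × Int := ([2, 3, 1], [1, 3, 2], 3)

def Spec_fair (nlist : List Int) (klist : List Int) (n : Int) (out : Int) : Prop := out = fair_alt nlist klist n
instance (nlist : List Int) (klist : List Int) (n : Int) (out : Int) : Decidable (Spec_fair nlist klist n out) := by unfold Spec_fair; infer_instance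

-- ===== CLAIM (what is proved, stated in full; the proofs are below) =====
def Claim_equal_fair : Prop := ∀ (nlist : List Int) (klist : List Int) (n : Int), Dom_fair nlist klist n → Pre_fair nlist klist n → Spec_fair nlist klist n (fair nlist klist n)

-- ===== LEMMAS AND PROOFS =====

theorem pvPopAt_natCast (xs : List Int) (k : Nat) (h : k < xs.length) :
    pvPopAt xs (k : Int) = xs.eraseIdx k := by
  simp [pvPopAt, PySem.List.pop?_natCast xs k h]

theorem pvPopAt_zero (xs : List Int) (h : xs ≠ []) : pvPopAt xs 0 = xs.tail := by
  cases xs with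
  | nil => exact absurd rfl h
  | cons x xs => simp [pvPopAt, PySem.List.pop?_zero_cons]

-- Invariant: the element A reads as klist[n-1] in its shrinking lists is the original
-- klist[j]; positions m < n of A's lists agree with n0[m] / k0[j-n+1+m] of the originals.
theorem fair_loop_eq (k : Nat) : ∀ (j fscore : Int) (na ka n0 k0 : List Int),
    k ≤ na.length → k ≤ ka.length → (k : Int) ≤ j + 1 →
    (∀ m : Nat, m < k → na[m]? = n0[m]?) →
    (∀ m : Nat, m < k → ka[m]? = k0[(j - k + 1 + m).toNat]?) →
    fairLoopA k na ka (k : Int) fscore = fairLoopB k n0 k0 ((k : Int) - 1) j fscore := by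
  induction k with
  | zero =>
    intro j fscore na ka n0 k0 _ _ _ _ _
    rfl
  | succ k ih =>
    intro j fscore na ka n0 k0 hna hka hj h1 h2
    simp only [fairLoopA, fairLoopB]
    rw [if_pos (show (0:Int) < ((k+1 : Nat) : Int) by omega),
        if_pos (show (0:Int) ≤ ((k+1 : Nat) : Int) - 1 by omega)]
    have hidx : ((k+1 : Nat) : Int) - 1 = ((k : Nat) : Int) := by push_cast; ring
    rw [hidx]
    simp only [PySem.List.pyGet?_natCast]
    rw [h1 k (by omega), h2 k (by omega),
        PySem.List.pyGet?_of_nonneg k0 (show (0:Int) ≤ j by omega)]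
    have hjn : (j - ((k+1 : Nat) : Int) + 1 + (k : Nat)).toNat = j.toNat := by omega
    rw [hjn]
    by_cases hc : (k0[j.toNat]?.getD 0) > (n0[k]?.getD 0)
    · rw [if_pos hc, if_pos hc,
          pvPopAt_natCast na k (by omega), pvPopAt_natCast ka k (by omega)]
      refine ih (j - 1) fscore _ _ n0 k0 ?_ ?_ (by omega) ?_ ?_
      · simp [List.length_eraseIdx, show k < na.length by omega]; omega
      · simp [List.length_eraseIdx, show k < ka.length by omega]; omega
      · intro m hm
        rw [List.getElem?_eraseIdx_of_lt (i := k) (j := m) hm, h1 m (by omega)]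
      · intro m hm
        rw [List.getElem?_eraseIdx_of_lt (i := k) (j := m) hm, h2 m (by omega)]
        have : (j - ((k+1 : Nat) : Int) + 1 + (m : Int)).toNat
             = (j - 1 - (k : Int) + 1 + (m : Int)).toNat := by omega
        rw [this]
    · rw [if_neg hc, if_neg hc,
          pvPopAt_natCast na k (by omega),
          pvPopAt_zero ka (by intro h; rw [h] at hka; simp at hka)]
      refine ih j (fscore + 1) _ _ n0 k0 ?_ ?_ (by omega) ?_ ?_
      · simp [List.length_eraseIdx, show k < na.length by omega]; omega
      · simp [List.length_tail]; omega
      · intro m hm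
        rw [List.getElem?_eraseIdx_of_lt (i := k) (j := m) hm, h1 m (by omega)]
      · intro m hm
        rw [List.getElem?_tail, h2 (m+1) (by omega)]
        have : (j - ((k+1 : Nat) : Int) + 1 + ((m+1 : Nat) : Int)).toNat
             = (j - (k : Int) + 1 + (m : Int)).toNat := by push_cast; omega
        rw [this]

-- ===== VERDICT (by name: the statement is the Claim_ definition above) =====
theorem fair_spec : Claim_equal_fair := by
  unfold Claim_equal_fair
  intro nlist klist n _ hpre
  unfold Spec_fair fair fair_alt
  obtain ⟨hn1, hn2⟩ := hpre
  by_cases hn : 0 < n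
  · have hk : n = ((n.toNat : Nat) : Int) := by omega
    rw [hk]
    simp only [Int.toNat_natCast]
    refine fair_loop_eq n.toNat (((n.toNat : Nat) : Int) - 1) 0 nlist klist nlist klist
      (by omega) (by omega) (by omega) (fun m _ => rfl) ?_
    intro m hm
    have : (((n.toNat : Nat) : Int) - 1 - (n.toNat : Int) + 1 + (m : Int)).toNat = m := by omega
    rw [this]
  · have h0 : n.toNat = 0 := by omega
    rw [h0]
    rfl
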